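-- pv_equiv track=rewrite | github.com/DavTho1983/PerfectApp | perfect_numbers.py | listInRange
-- ===== SOURCE A (Python) =====
-- def classify(num):
--     factors = []
--
--     for i in range(1, num):
--         if num % i == 0:
--             factors.append(i)
--
--     if sum(factors) > num:
--         return 'abundant'
--     elif sum(factors) < num:
--         return 'deficient'
--     return 'perfect'
--
-- def listInRange(start, end, aliquot):
--
--     if aliquot == 'Abundant':
--         aliStr = 'abundant'
--     elif aliquot == 'perfect':
--         aliStr = 'perfect'
--     else:
--         aliStr = 'deficient'
--
--     aliList = []
--
--     for i in range(start, end):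
--         if classify(i) == aliStr:
--             aliList.append(i)
--
--     if aliList == []:
--         return 'There are no ' + ' aliStr ' + ' numbers in this range'
--     return ', '.join(map(str, aliList))
-- ===== SOURCE B (Python) =====
-- def listInRange(start, end, aliquot):
--     if aliquot == 'Abundant':
--         aliStr = 'abundant'
--     elif aliquot == 'perfect':
--         aliStr = 'perfect'
--     else:
--         aliStr = 'deficient'
--
--     n = max(end, 0) if start < end else 0
--     divsum = [0] * n
--     for d in range(1, n):
--         for m in range(2 * d, n, d):
--             divsum[m] += d
--
--     aliList = []
--     for i in range(start, end):
--         s = divsum[i] if i >= 0 else 0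
--         if s > i:
--             c = 'abundant'
--         elif s < i:
--             c = 'deficient'
--         else:
--             c = 'perfect'
--         if c == aliStr:
--             aliList.append(i)
--
--     if aliList == []:
--         return 'There are no ' + ' aliStr ' + ' numbers in this range'
--     return ', '.join(map(str, aliList))
-- ===== Notes on version B (the rewrite author's own statement) =====
-- stated objective: alternative
-- what changed: Replaces A's per-number trial division (classify rescans 1..i-1 for every i) with a single divisor-sum sieve over 0..end-1 (each d added to divsum[m] for its multiples m, skipped entirely when the range is empty) followed by one classification pass; asymptotically fewer operations on wide ranges, but a timing run could not confirm a uniform speedup (on very narrow ranges near a large end the sieve does comparable work), so no speed is claimed.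
import Mathlib
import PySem

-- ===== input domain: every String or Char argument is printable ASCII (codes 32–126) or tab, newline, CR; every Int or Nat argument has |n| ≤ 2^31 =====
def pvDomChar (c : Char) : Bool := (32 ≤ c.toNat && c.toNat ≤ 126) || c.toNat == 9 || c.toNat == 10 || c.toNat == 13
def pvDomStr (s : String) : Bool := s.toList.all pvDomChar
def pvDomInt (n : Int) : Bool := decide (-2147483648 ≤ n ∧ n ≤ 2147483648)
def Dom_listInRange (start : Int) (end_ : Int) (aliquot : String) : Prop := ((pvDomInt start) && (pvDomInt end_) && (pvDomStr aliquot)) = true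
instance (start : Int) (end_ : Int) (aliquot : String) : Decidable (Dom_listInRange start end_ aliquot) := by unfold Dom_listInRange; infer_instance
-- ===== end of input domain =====

-- B replaces A's per-number trial division with one divisor-sum sieve over 0..end-1
-- (skipped when the range is empty), then a single classification pass; objective: alternative.

-- ===== PORT A =====
def classify (num : Int) : String :=
  -- factors = []; for i in range(1, num): if num % i == 0: factors.append(i)
  let factors : List Int := (PySem.List.pyRange 1 num).foldl
    (fun acc i => if PySem.Int.mod num i = 0 then acc ++ [i] else acc) []
  if factors.sum > num then "abundant"
  else if factors.sum < num then "deficient"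
  else "perfect"

def listInRange (start : Int) (end_ : Int) (aliquot : String) : String :=
  let aliStr := if aliquot = "Abundant" then "abundant"
    else if aliquot = "perfect" then "perfect" else "deficient"
  let aliList : List Int := (PySem.List.pyRange start end_).foldl
    (fun acc i => if classify i = aliStr then acc ++ [i] else acc) []
  if aliList = [] then "There are no " ++ " aliStr " ++ " numbers in this range"
  else PySem.Str.join ", " (aliList.map PySem.Int.toStr)

-- ===== PORT B =====
def listInRange_alt (start : Int) (end_ : Int) (aliquot : String) : String :=
  let aliStr := if aliquot = "Abundant" then "abundant"
    else if aliquot = "perfect" then "perfect" else "deficient"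
  let n := if start < end_ then max end_ 0 else 0
  -- divsum = [0]*n; for d in range(1,n): for m in range(2*d,n,d): divsum[m] += d
  -- (every written index m satisfies 2 ≤ 2*d ≤ m < n, so m.toNat is exact and in range)
  let divsum : List Int := (PySem.List.pyRange 1 n).foldl
    (fun t d => (PySem.List.pyRange (2*d) n d).foldl
      (fun t m => t.set m.toNat (t.getD m.toNat 0 + d)) t)
    (List.replicate n.toNat 0)
  let aliList : List Int := (PySem.List.pyRange start end_).foldl
    (fun acc i =>
      -- s = divsum[i] if i >= 0 else 0   (0 ≤ i < end_ = n, so the index is in range)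
      let s : Int := if 0 ≤ i then divsum.getD i.toNat 0 else 0
      let c := if s > i then "abundant" else if s < i then "deficient" else "perfect"
      if c = aliStr then acc ++ [i] else acc) []
  if aliList = [] then "There are no " ++ " aliStr " ++ " numbers in this range"
  else PySem.Str.join ", " (aliList.map PySem.Int.toStr)

-- ===== PRECONDITION & SPEC =====
def Spec_listInRange (start : Int) (end_ : Int) (aliquot : String) (out : String) : Prop := out = listInRange_alt start end_ aliquot
instance (start : Int) (end_ : Int) (aliquot : String) (out : String) : Decidable (Spec_listInRange start end_ aliquot out) := by unfold Spec_listInRange; infer_instance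

-- ===== CLAIM (what is proved, stated in full; the proofs are below) =====
def Claim_equal_listInRange : Prop := ∀ (start : Int) (end_ : Int) (aliquot : String), Dom_listInRange start end_ aliquot → Spec_listInRange start end_ aliquot (listInRange start end_ aliquot)

-- ===== LEMMAS AND PROOFS =====

-- sum of the proper divisors of num, as A's factors list computes it
def aSum (num : Int) : Int :=
  ((PySem.List.pyRange 1 num).filter (fun j => decide (PySem.Int.mod num j = 0))).sum

theorem classify_eq_aSum (num : Int) :
    classify num = (if aSum num > num then "abundant"
      else if aSum num < num then "deficient" else "perfect") := by
  unfold classify aSum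
  rw [PySem.List.foldl_append_ite_eq_filter (p := fun i => PySem.Int.mod num i = 0)]
  rfl

theorem nodup_pyRange_pos {a b s : Int} (hs : 0 < s) : (PySem.List.pyRange a b s).Nodup := by
  rw [PySem.List.pyRange_of_pos a b hs]
  refine List.Nodup.map ?_ (List.nodup_range)
  intro x y h
  have hxy : s * (x : Int) = s * y := by linarith
  exact_mod_cast mul_left_cancel₀ (by omega : s ≠ 0) hxy

theorem foldl_set_length (ms : List Int) (g : List Int → Int → Int) (t : List Int) :
    (ms.foldl (fun t m => t.set m.toNat (g t m)) t).length = t.length := by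
  induction ms generalizing t with
  | nil => rfl
  | cons m ms ih => simp [ih, List.length_set]

theorem foldl_set_getD (ms : List Int) (d : Int) (t : List Int)
    (hnd : ms.Nodup) (hpos : ∀ m ∈ ms, 0 ≤ m) (i : Nat) (hi : i < t.length) :
    ((ms.foldl (fun t m => t.set m.toNat (t.getD m.toNat 0 + d)) t).getD i 0)
      = t.getD i 0 + (if (i : Int) ∈ ms then d else 0) := by
  induction ms generalizing t with
  | nil => simp
  | cons m ms ih =>
    have hm0 : 0 ≤ m := hpos m (by simp)
    have hlen : i < (t.set m.toNat (t.getD m.toNat 0 + d)).length := by simpa using hi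
    rw [List.foldl_cons, ih _ hnd.of_cons (fun x hx => hpos x (List.mem_cons_of_mem _ hx)) hlen]
    by_cases hmi : (i : Int) = m
    · have hit : m.toNat = i := by omega
      have hnotin : (i : Int) ∉ ms := by rw [hmi]; exact (List.nodup_cons.mp hnd).1
      have hmnotin : m ∉ ms := hmi ▸ hnotin
      rw [hit]
      simp [List.getD_eq_getElem?_getD, hi, hmi, hmnotin]
    · have hne : i ≠ m.toNat := by omega
      have : (t.set m.toNat (t.getD m.toNat 0 + d)).getD i 0 = t.getD i 0 := by
        simp [List.getD_eq_getElem?_getD, Ne.symm hne]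
      rw [this]
      simp [hmi]

theorem sieve_outer (ds : List Int) (n : Int) (t : List Int)
    (ht : (n.toNat : Int) ≤ t.length) (hd : ∀ d ∈ ds, 0 < d)
    (i : Nat) (hi : (i : Int) < n) :
    ((ds.foldl (fun t d => (PySem.List.pyRange (2*d) n d).foldl
        (fun t m => t.set m.toNat (t.getD m.toNat 0 + d)) t) t).getD i 0)
      = t.getD i 0 + (ds.map (fun d => if d ∣ (i : Int) ∧ 2*d ≤ (i : Int) then d else 0)).sum := by
  induction ds generalizing t with
  | nil => simp
  | cons dd ds ih =>
    have hdd : 0 < dd := hd dd (by simp)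
    have hinat : i < t.length := by omega
    have hlen' : ((PySem.List.pyRange (2*dd) n dd).foldl
        (fun t m => t.set m.toNat (t.getD m.toNat 0 + dd)) t).length = t.length :=
      foldl_set_length _ _ t
    rw [List.foldl_cons,
        ih _ (by rw [hlen']; exact ht) (fun x hx => hd x (List.mem_cons_of_mem _ hx)),
        foldl_set_getD _ dd t (nodup_pyRange_pos hdd)
          (fun m hm => by
            have := (PySem.List.mem_pyRange_iff_of_pos hdd m).mp hm
            omega)
          i hinat]
    have hmem : ((i : Int) ∈ PySem.List.pyRange (2*dd) n dd) ↔ (dd ∣ (i : Int) ∧ 2*dd ≤ (i : Int)) := by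
      rw [PySem.List.mem_pyRange_iff_of_pos hdd]
      constructor
      · rintro ⟨h1, _, h3⟩
        refine ⟨?_, h1⟩
        have h4 : dd ∣ (i : Int) - 2*dd + 2*dd := dvd_add h3 ⟨2, mul_comm 2 dd⟩
        simpa using h4
      · rintro ⟨h1, h2⟩
        exact ⟨h2, hi, dvd_sub h1 ⟨2, mul_comm 2 dd⟩⟩
    simp only [hmem, List.map_cons, List.sum_cons]
    ring

theorem sum_ite_eq_sum_filter (l : List Int) (p : Int → Bool) :
    (l.map (fun x => if p x then x else 0)).sum = (l.filter p).sum := by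
  induction l with
  | nil => rfl
  | cons x l ih => by_cases h : p x <;> simp [h, ih]

theorem pyRange_one_nil {a b : Int} (h : b ≤ a) : PySem.List.pyRange a b = [] := by
  rw [PySem.List.pyRange_of_pos a b one_pos]
  simp [not_lt.mpr h]

theorem aSum_of_nonpos (i : Int) (h : i < 1) : aSum i = 0 := by
  unfold aSum
  rw [pyRange_one_nil (by omega)]
  rfl

theorem sum_sieve_eq_aSum (i n : Int) (h0 : 0 ≤ i) (hin : i < n) :
    ((PySem.List.pyRange 1 n).map (fun d => if d ∣ i ∧ 2*d ≤ i then d else 0)).sum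
      = aSum i := by
  rcases lt_or_ge i 1 with hi1 | hi1
  · rw [aSum_of_nonpos i hi1]
    apply List.sum_eq_zero
    intro x hx
    simp only [List.mem_map] at hx
    obtain ⟨d, hd, rfl⟩ := hx
    have hdm := (PySem.List.mem_pyRange_one).mp hd
    have hno : ¬ (d ∣ i ∧ 2*d ≤ i) := by rintro ⟨_, h2⟩; omega
    simp [hno]
  · rw [PySem.List.pyRange_one_append 1 i n hi1 (le_of_lt hin), List.map_append,
        List.sum_append]
    have h2 : ((PySem.List.pyRange i n).map
        (fun d => if d ∣ i ∧ 2*d ≤ i then d else 0)).sum = 0 := by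
      apply List.sum_eq_zero
      intro x hx
      simp only [List.mem_map] at hx
      obtain ⟨d, hd, rfl⟩ := hx
      have hdm := (PySem.List.mem_pyRange_one).mp hd
      have hno : ¬ (d ∣ i ∧ 2*d ≤ i) := by rintro ⟨_, h2⟩; omega
      simp [hno]
    rw [h2, add_zero]
    have h1 : ((PySem.List.pyRange 1 i).map
        (fun d => if d ∣ i ∧ 2*d ≤ i then d else 0))
        = ((PySem.List.pyRange 1 i).map
        (fun d => if (fun j => decide (PySem.Int.mod i j = 0)) d then d else 0)) := by
      apply List.map_congr_left
      intro d hd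
      have hdm := (PySem.List.mem_pyRange_one).mp hd
      by_cases hdvd : d ∣ i
      · have h2d : 2*d ≤ i := by
          obtain ⟨k, hk⟩ := hdvd
          have hk2 : 2 ≤ k := by nlinarith
          nlinarith
        simp [hdvd, h2d, (PySem.Int.mod_eq_zero_iff_dvd i d).mpr hdvd]
      · have : ¬ (d ∣ i ∧ 2*d ≤ i) := by rintro ⟨h', _⟩; exact hdvd h'
        have hm : ¬ (PySem.Int.mod i d = 0) := fun hmz =>
          hdvd ((PySem.Int.mod_eq_zero_iff_dvd i d).mp hmz)
        simp [this, hm]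
    rw [h1, sum_ite_eq_sum_filter]
    rfl

theorem divsum_getD (e i : Int) (h0 : 0 ≤ i) (hie : i < e) :
    (((PySem.List.pyRange 1 (max e 0)).foldl
      (fun t d => (PySem.List.pyRange (2*d) (max e 0) d).foldl
        (fun t m => t.set m.toNat (t.getD m.toNat 0 + d)) t)
      (List.replicate (max e 0).toNat 0)).getD i.toNat 0)
      = aSum i := by
  have hcast : ((i.toNat : Nat) : Int) = i := Int.toNat_of_nonneg h0
  have hmax : max e 0 = e := by omega
  rw [sieve_outer _ (max e 0) _ (by simp)
      (fun d hd => by have := (PySem.List.mem_pyRange_one).mp hd; omega)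
      i.toNat (by omega)]
  simp only [hcast, hmax]
  rw [List.getD_eq_getElem?_getD]
  simp only [List.getElem?_replicate]
  have hlt : i.toNat < e.toNat := by omega
  simp [hlt, sum_sieve_eq_aSum i e h0 hie]

theorem fold_eq (start end_ : Int) (aliStr : String) :
    (PySem.List.pyRange start end_).foldl
      (fun acc i => if classify i = aliStr then acc ++ [i] else acc) []
    = (PySem.List.pyRange start end_).foldl
      (fun acc i =>
        if (if (if 0 ≤ i then ((PySem.List.pyRange 1 (if start < end_ then max end_ 0 else 0)).foldl
      (fun t d => (PySem.List.pyRange (2*d) (if start < end_ then max end_ 0 else 0) d).foldl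
        (fun t m => t.set m.toNat (t.getD m.toNat 0 + d)) t)
      (List.replicate (if start < end_ then max end_ 0 else 0).toNat 0)).getD i.toNat 0 else 0) > i then "abundant"
            else if (if 0 ≤ i then ((PySem.List.pyRange 1 (if start < end_ then max end_ 0 else 0)).foldl
      (fun t d => (PySem.List.pyRange (2*d) (if start < end_ then max end_ 0 else 0) d).foldl
        (fun t m => t.set m.toNat (t.getD m.toNat 0 + d)) t)
      (List.replicate (if start < end_ then max end_ 0 else 0).toNat 0)).getD i.toNat 0 else 0) < i then "deficient"
            else "perfect") = aliStr then acc ++ [i] else acc) [] := by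
  apply PySem.List.foldl_congr_mem
  intro acc i hi
  have him := (PySem.List.mem_pyRange_one).mp hi
  have hlt : start < end_ := by omega
  simp only [if_pos hlt]
  have hcl : classify i
      = (if (if 0 ≤ i then ((PySem.List.pyRange 1 (max end_ 0)).foldl
      (fun t d => (PySem.List.pyRange (2*d) (max end_ 0) d).foldl
        (fun t m => t.set m.toNat (t.getD m.toNat 0 + d)) t)
      (List.replicate (max end_ 0).toNat 0)).getD i.toNat 0 else 0) > i then "abundant"
          else if (if 0 ≤ i then ((PySem.List.pyRange 1 (max end_ 0)).foldl
      (fun t d => (PySem.List.pyRange (2*d) (max end_ 0) d).foldl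
        (fun t m => t.set m.toNat (t.getD m.toNat 0 + d)) t)
      (List.replicate (max end_ 0).toNat 0)).getD i.toNat 0 else 0) < i then "deficient"
          else "perfect") := by
    by_cases h0 : 0 ≤ i
    · simp only [classify_eq_aSum, if_pos h0, divsum_getD end_ i h0 him.2]
    · simp only [classify_eq_aSum, if_neg h0, aSum_of_nonpos i (by omega)]
  rw [hcl]

-- ===== VERDICT (by name: the statement is the Claim_ definition above) =====
theorem listInRange_spec : Claim_equal_listInRange := by
  intro start end_ aliquot _
  unfold Spec_listInRange listInRange listInRange_alt
  simp only [fold_eq]
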